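-- pv_equiv track=rewrite | github.com/Smoothtalk/ani-script-deprecrated- | setup.py | check3List
-- ===== SOURCE A (Python) =====
-- dependencies3 = ['discord.py', 'multidict', 'websockets']
--
-- def check3List(packages):
-- 	allPackageNames = []
-- 	remainingDependicies = []
-- 	index = 0
--
-- 	for element in dependencies3:
-- 		remainingDependicies.append(element)
--
-- 	for package in packages:
-- 		allPackageNames.append(packages[index]['Name'])
-- 		index+=1
--
-- 	for term in dependencies3:
-- 		byteTerm = 'b\'' + term + '\'' #add binary typing ish
-- 		if byteTerm in allPackageNames:
-- 			remainingDependicies.remove(term)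
--
-- 	return remainingDependicies
-- ===== SOURCE B (Python) =====
-- dependencies3 = ['discord.py', 'multidict', 'websockets']
--
-- def check3List(packages):
--     # single pass over packages, constant-size lookup table byte-name -> dependency
--     byte_to_term = {"b'" + t + "'": t for t in dependencies3}
--     remaining = list(dependencies3)
--     for package in packages:
--         term = byte_to_term.get(package['Name'])
--         if term is not None and term in remaining:
--             remaining.remove(term)
--     return remaining
-- ===== Notes on version B (the rewrite author's own statement) =====
-- stated objective: alternative
-- what changed: B inverts the traversal: instead of building the full package-name list and then scanning it once per dependency, B makes one pass over packages with a precomputed byte-name->dependency table and removes each dependency the first time its byte-wrapped name is seen.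
import Mathlib
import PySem

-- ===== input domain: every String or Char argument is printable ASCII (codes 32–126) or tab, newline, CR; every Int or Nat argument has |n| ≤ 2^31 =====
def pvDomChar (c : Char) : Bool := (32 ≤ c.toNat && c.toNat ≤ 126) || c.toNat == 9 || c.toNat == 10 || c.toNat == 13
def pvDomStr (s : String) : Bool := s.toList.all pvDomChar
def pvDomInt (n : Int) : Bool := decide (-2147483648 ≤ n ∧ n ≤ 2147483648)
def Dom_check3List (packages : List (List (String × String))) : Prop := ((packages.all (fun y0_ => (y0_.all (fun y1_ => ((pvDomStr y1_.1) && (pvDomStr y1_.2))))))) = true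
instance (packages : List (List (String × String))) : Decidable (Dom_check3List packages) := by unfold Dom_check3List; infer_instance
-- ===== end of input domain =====

-- B inverts the traversal (one pass over packages with a byte-name lookup table) instead of
-- scanning the materialised name list once per dependency; same return value on Pre_.

def dependencies3 : List String := ["discord.py", "multidict", "websockets"]

-- ===== PORT A =====
def check3List (packages : List (List (String × String))) : List String :=
  let remainingDependicies : List String :=
    dependencies3.foldl (fun acc element => acc ++ [element]) []
  -- 'for package in packages: allPackageNames.append(packages[index]['Name']); index += 1'
  let st : List String × Int := packages.foldl
    (fun st _package =>
      (st.1 ++ [(((PySem.List.pyGet? packages st.2).getD []).lookup "Name").getD ""], st.2 + 1))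
    ([], 0)
  let allPackageNames := st.1
  dependencies3.foldl
    (fun rem term =>
      let byteTerm := "b'" ++ term ++ "'"
      if byteTerm ∈ allPackageNames then (PySem.List.remove? rem term).getD rem else rem)
    remainingDependicies

-- ===== PORT B =====
def check3List_alt (packages : List (List (String × String))) : List String :=
  let byteToTerm : List (String × String) :=
    dependencies3.foldl (fun d t => d ++ [("b'" ++ t ++ "'", t)]) []
  packages.foldl
    (fun remaining package =>
      match byteToTerm.lookup ((package.lookup "Name").getD "") with
      | some term =>
          if term ∈ remaining then (PySem.List.remove? remaining term).getD remaining
          else remaining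
      | none => remaining)
    dependencies3

-- ===== PRECONDITION & SPEC =====
-- Pre_ excludes exactly the inputs where some package has no 'Name' key: there Python A
-- (packages[index]['Name']) raises KeyError, and Python B raises KeyError too.
def Pre_check3List (packages : List (List (String × String))) : Prop :=
  ∀ p ∈ packages, (p.lookup "Name").isSome = true
instance (packages : List (List (String × String))) : Decidable (Pre_check3List packages) := by
  unfold Pre_check3List; infer_instance

def pvWitness_check3List : (List (List (String × String))) :=
  [[("Name", "b'multidict'")], [("Name", "numpy"), ("Version", "1.0")]]

def Spec_check3List (packages : List (List (String × String))) (out : List String) : Prop := out = check3List_alt packages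
instance (packages : List (List (String × String))) (out : List String) : Decidable (Spec_check3List packages out) := by unfold Spec_check3List; infer_instance

-- ===== CLAIM (what is proved, stated in full; the proofs are below) =====
def Claim_equal_check3List : Prop := ∀ (packages : List (List (String × String))), Dom_check3List packages → Pre_check3List packages → Spec_check3List packages (check3List packages)

-- ===== LEMMAS AND PROOFS =====

/-- The names A collects: `packages[i]['Name']` for each index, with a harmless
default for the missing-key case excluded by `Pre_`. -/
def namesOf (packages : List (List (String × String))) : List String :=
  packages.map (fun p => (p.lookup "Name").getD "")

/-- A's indexed name-collecting loop, generalised over a consumed prefix. -/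
lemma A_names_fold (suf : List (List (String × String))) :
    ∀ (pre : List (List (String × String))) (acc : List String),
    suf.foldl
      (fun (st : List String × Int) _package =>
        (st.1 ++ [(((PySem.List.pyGet? (pre ++ suf) st.2).getD []).lookup "Name").getD ""], st.2 + 1))
      (acc, (pre.length : Int))
    = (acc ++ namesOf suf, (pre.length : Int) + suf.length) := by
  induction suf with
  | nil => intro pre acc; simp [namesOf]
  | cons p suf ih =>
    intro pre acc
    simp only [List.foldl_cons]
    rw [PySem.List.pyGet?_append_length]
    simp only [Option.getD_some]
    have h2 : (pre ++ p :: suf) = (pre ++ [p]) ++ suf := by simp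
    have h3 : ((pre.length : Int) + 1) = ((pre ++ [p]).length : Int) := by simp
    rw [h2, h3, ih (pre ++ [p]) (acc ++ [(p.lookup "Name").getD ""])]
    simp [namesOf]
    push_cast; ring

/-- Characterisation of A: the surviving dependencies in order. -/
lemma A_eq (packages : List (List (String × String))) :
    check3List packages
      = dependencies3.filter (fun t => !(decide (("b'" ++ t ++ "'") ∈ namesOf packages))) := by
  unfold check3List
  have := A_names_fold packages [] []
  simp only [List.nil_append, List.length_nil, Nat.cast_zero] at this
  rw [this]
  simp only [List.nil_append]
  by_cases h1 : ("b'discord.py'" : String) ∈ namesOf packages <;>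
  by_cases h2 : ("b'multidict'" : String) ∈ namesOf packages <;>
  by_cases h3 : ("b'websockets'" : String) ∈ namesOf packages <;>
    simp [dependencies3, List.foldl, List.filter, h1, h2, h3, PySem.List.remove?] <;> decide

set_option maxRecDepth 4000 in
/-- One step of B's loop preserves the filter characterisation of `remaining`
(`n` is the looked-up package name). -/
lemma B_step (names : List String) (n : String) :
    (match [("b'discord.py'", "discord.py"), ("b'multidict'", "multidict"),
            ("b'websockets'", "websockets")].lookup n with
     | some term =>
         if term ∈ dependencies3.filter (fun t => !(decide (("b'" ++ t ++ "'") ∈ names))) then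
           (PySem.List.remove? (dependencies3.filter (fun t => !(decide (("b'" ++ t ++ "'") ∈ names)))) term).getD
             (dependencies3.filter (fun t => !(decide (("b'" ++ t ++ "'") ∈ names))))
         else dependencies3.filter (fun t => !(decide (("b'" ++ t ++ "'") ∈ names)))
     | none => dependencies3.filter (fun t => !(decide (("b'" ++ t ++ "'") ∈ names))))
    = dependencies3.filter
        (fun t => !(decide (("b'" ++ t ++ "'") ∈ names ++ [n]))) := by
  cases e1 : n == "b'discord.py'" <;>
  cases e2 : n == "b'multidict'" <;>
  cases e3 : n == "b'websockets'" <;>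
  by_cases h1 : ("b'discord.py'" : String) ∈ names <;>
  by_cases h2 : ("b'multidict'" : String) ∈ names <;>
  by_cases h3 : ("b'websockets'" : String) ∈ names <;>
    simp_all [dependencies3, List.filter, List.lookup, PySem.List.remove?, List.mem_append,
      beq_iff_eq, beq_eq_false_iff_ne, eq_comm (b := n)] <;>
  first
  | decide
  | simp [beq_eq_false_iff_ne.mpr e1, beq_eq_false_iff_ne.mpr e2, beq_eq_false_iff_ne.mpr e3]

/-- B's whole loop, by induction with the accumulated name prefix. -/
lemma B_fold (l : List (List (String × String))) :
    ∀ (names : List String),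
    l.foldl
      (fun remaining package =>
        match [("b'discord.py'", "discord.py"), ("b'multidict'", "multidict"),
               ("b'websockets'", "websockets")].lookup ((package.lookup "Name").getD "") with
        | some term =>
            if term ∈ remaining then (PySem.List.remove? remaining term).getD remaining
            else remaining
        | none => remaining)
      (dependencies3.filter (fun t => !(decide (("b'" ++ t ++ "'") ∈ names))))
    = dependencies3.filter (fun t => !(decide (("b'" ++ t ++ "'") ∈ names ++ namesOf l))) := by
  induction l with
  | nil => intro names; simp [namesOf]
  | cons p l ih =>
    intro names
    simp only [List.foldl_cons]
    rw [B_step names ((p.lookup "Name").getD ""), ih (names ++ [(p.lookup "Name").getD ""])]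
    simp [namesOf]

lemma B_eq (packages : List (List (String × String))) :
    check3List_alt packages
      = dependencies3.filter (fun t => !(decide (("b'" ++ t ++ "'") ∈ namesOf packages))) := by
  unfold check3List_alt
  have hdict : (dependencies3.foldl (fun d t => d ++ [("b'" ++ t ++ "'", t)]) []
      : List (String × String))
      = [("b'discord.py'", "discord.py"), ("b'multidict'", "multidict"),
         ("b'websockets'", "websockets")] := by decide
  simp only [hdict]
  have hstart : (dependencies3
      : List String)
      = dependencies3.filter (fun t => !(decide (("b'" ++ t ++ "'") ∈ ([] : List String)))) := by
    decide
  conv_lhs => rw [hstart]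
  rw [B_fold packages []]
  simp only [List.nil_append]
  rfl

-- ===== VERDICT (by name: the statement is the Claim_ definition above) =====
theorem check3List_spec : Claim_equal_check3List := by
  intro packages _ _
  show check3List packages = check3List_alt packages
  rw [A_eq, B_eq]
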